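-- pv_equiv track=rewrite | github.com/TaeGyumKim/study-helper | src/service/scheduler.py | parse_schedule_input
-- ===== SOURCE A (Python) =====
-- DEFAULT_SCHEDULE_HOURS = [9, 13, 18, 23]
--
-- def parse_schedule_input(raw: str) -> list[int] | None:
--     """스케줄 입력 문자열을 파싱한다.
--
--     Args:
--         raw: 쉼표로 구분된 시간 문자열 (예: "8,12,18,22")
--
--     Returns:
--         정렬된 시간 목록. 파싱 실패 시 None.
--     """
--     if not raw.strip():
--         return list(DEFAULT_SCHEDULE_HOURS)
--     try:
--         hours = [int(h.strip()) for h in raw.split(",")]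
--         if not hours or any(h < 0 or h > 23 for h in hours):
--             return None
--         return sorted(set(hours))
--     except ValueError:
--         return None
-- ===== SOURCE B (Python) =====
-- DEFAULT_SCHEDULE_HOURS = [9, 13, 18, 23]
--
-- def parse_schedule_input(raw: str) -> list[int] | None:
--     """Single pass: validate each piece as it is parsed, marking a 24-slot
--     presence table, then emit the marked hours in index order (bucket sort)."""
--     if not raw.strip():
--         return list(DEFAULT_SCHEDULE_HOURS)
--     present = [False] * 24
--     for part in raw.split(","):
--         try:
--             h = int(part.strip())
--         except ValueError:
--             return None
--         if h < 0 or h > 23: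
--             return None
--         present[h] = True
--     return [h for h in range(24) if present[h]]
-- ===== Notes on version B (the rewrite author's own statement) =====
-- stated objective: alternative
-- what changed: Replaces A's parse-all-then-validate-then-sorted(set(...)) pipeline by a single validating pass that marks a 24-slot boolean presence table (returning None on the first bad piece) and then emits the marked hours in index order, a bucket/counting sort over the fixed 0-23 domain instead of a comparison sort.
import Mathlib
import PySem

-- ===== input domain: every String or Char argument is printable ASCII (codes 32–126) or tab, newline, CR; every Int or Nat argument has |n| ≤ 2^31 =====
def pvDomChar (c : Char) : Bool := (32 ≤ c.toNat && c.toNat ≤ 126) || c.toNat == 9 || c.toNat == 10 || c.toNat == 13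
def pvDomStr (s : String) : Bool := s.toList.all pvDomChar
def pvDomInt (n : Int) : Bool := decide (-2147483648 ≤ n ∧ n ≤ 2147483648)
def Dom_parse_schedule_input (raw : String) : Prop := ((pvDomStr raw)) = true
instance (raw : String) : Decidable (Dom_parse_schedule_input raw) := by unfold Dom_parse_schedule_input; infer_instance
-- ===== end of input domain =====

-- B replaces A's parse-all-then-validate-then-sorted(set(...)) pipeline by a single validating
-- pass that marks a 24-slot presence table and emits the marked hours in index order (bucket sort).

-- ===== PORT A =====
def parse_schedule_input (raw : String) : Option (List Int) :=
  if PySem.Str.strip raw = "" then some [9, 13, 18, 23]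
  else
    -- raw.split(",") with literal nonempty sep; int() raising ValueError inside the
    -- comprehension is the caught exception → None, modelled by mapM returning none
    match ((PySem.Str.split? raw ",").getD []).mapM (fun h => PySem.Int.ofStr? (PySem.Str.strip h)) with
    | none => none
    | some hours =>
      if hours = [] ∨ hours.any (fun h => decide (h < 0) || decide (h > 23)) = true then none
      else some (PySem.List.sorted (PySem.Set.ofList hours) (fun x => x) false)

-- ===== PORT B =====
-- the for-loop over raw.split(","): parse each piece, return None on ValueError or
-- out-of-range, otherwise mark present[h] (index always in range 0..23, so .set is exact)
def pvParseLoop : List String → List Bool → Option (List Bool)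
  | [], present => some present
  | p :: ps, present =>
    match PySem.Int.ofStr? (PySem.Str.strip p) with
    | none => none
    | some h =>
      if decide (h < 0) || decide (h > 23) then none
      else pvParseLoop ps (present.set h.toNat true)

def parse_schedule_input_alt (raw : String) : Option (List Int) :=
  if PySem.Str.strip raw = "" then some [9, 13, 18, 23]
  else
    match pvParseLoop ((PySem.Str.split? raw ",").getD []) (List.replicate 24 false) with
    | none => none
    | some present =>
      -- [h for h in range(24) if present[h]] ; present[h] with 0 ≤ h < 24 = len(present) is exact as getD
      some ((PySem.List.pyRange 0 24 1).filter (fun h => present.getD h.toNat false))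

-- ===== PRECONDITION & SPEC =====
def Spec_parse_schedule_input (raw : String) (out : Option (List Int)) : Prop := out = parse_schedule_input_alt raw
instance (raw : String) (out : Option (List Int)) : Decidable (Spec_parse_schedule_input raw out) := by unfold Spec_parse_schedule_input; infer_instance

-- ===== CLAIM (what is proved, stated in full; the proofs are below) =====
def Claim_equal_parse_schedule_input : Prop := ∀ (raw : String), Dom_parse_schedule_input raw → Spec_parse_schedule_input raw (parse_schedule_input raw)

-- ===== LEMMAS AND PROOFS =====

-- str.split with a nonempty separator always yields at least one piece
theorem splitOn_go_ne_nil (sep : List Char) : ∀ (fuel : Nat) (l cur : List Char) (acc : List (List Char)),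
    PySem.Chars.splitOn.go sep fuel l cur acc ≠ [] := by
  intro fuel
  induction fuel with
  | zero => intro l cur acc; simp [PySem.Chars.splitOn.go]
  | succ n ih =>
    intro l cur acc
    cases l with
    | nil => simp [PySem.Chars.splitOn.go]
    | cons c rest =>
      rw [PySem.Chars.splitOn.go]
      split <;> apply ih

theorem split?_getD_ne_nil (s : String) : (PySem.Str.split? s ",").getD [] ≠ [] := by
  simp [PySem.Str.split?, PySem.Chars.split?, PySem.Chars.splitOn]
  apply splitOn_go_ne_nil

theorem mapM_some_ne_nil {α β : Type} (f : α → Option β) (xs : List α) (ys : List β)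
    (hxs : xs ≠ []) (h : xs.mapM f = some ys) : ys ≠ [] := by
  cases xs with
  | nil => exact absurd rfl hxs
  | cons x xs' =>
    cases hfx : f x with
    | none => simp [List.mapM_cons, hfx] at h
    | some b =>
      cases hm : xs'.mapM f with
      | none => simp [List.mapM_cons, hfx, hm] at h
      | some bs =>
        simp [List.mapM_cons, hfx, hm] at h
        simp [← h]

-- after the marking pass, slot i is set exactly when i occurred among the hours
theorem foldl_set_getD (hours : List Int) : ∀ (pr : List Bool), pr.length = 24 →
    (∀ h ∈ hours, 0 ≤ h ∧ h ≤ 23) → ∀ i : Int, 0 ≤ i → i < 24 →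
    ((hours.foldl (fun p x => p.set x.toNat true) pr).getD i.toNat false)
      = (pr.getD i.toNat false || decide (i ∈ hours)) := by
  induction hours with
  | nil => intro pr _ _ i _ _; simp
  | cons h hs ih =>
    intro pr hlen hran i hi0 hi24
    simp only [List.foldl_cons]
    rw [ih (pr.set h.toNat true) (by simp [hlen])
        (fun x hx => hran x (List.mem_cons_of_mem _ hx)) i hi0 hi24]
    have hr := hran h (List.mem_cons_self)
    by_cases heq : h = i
    · subst heq
      have hset : (pr.set h.toNat true)[h.toNat]?.getD false = true := by
        rw [List.getElem?_set]
        have : h.toNat < pr.length := by omega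
        simp [this]
      simp [List.getD_eq_getElem?_getD, hset]
    · have hne : h.toNat ≠ i.toNat := by omega
      have hset : (pr.set h.toNat true).getD i.toNat false = pr.getD i.toNat false := by
        rw [List.getD_eq_getElem?_getD, List.getElem?_set, if_neg hne,
            ← List.getD_eq_getElem?_getD]
      rw [hset]
      have : (i ∈ h :: hs) ↔ (i ∈ hs) := by
        constructor
        · intro hm; rcases List.mem_cons.mp hm with rfl | hm
          · exact absurd rfl heq
          · exact hm
        · exact List.mem_cons_of_mem _
      simp [this]

-- the single validating pass equals A's parse-then-validate pipeline, presence table included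
theorem pvParseLoop_eq (parts : List String) : ∀ (present : List Bool),
    pvParseLoop parts present =
      match parts.mapM (fun p => PySem.Int.ofStr? (PySem.Str.strip p)) with
      | none => none
      | some hours =>
        if hours.any (fun h => decide (h < 0) || decide (h > 23)) then none
        else some (hours.foldl (fun pr h => pr.set h.toNat true) present) := by
  induction parts with
  | nil => intro present; simp [pvParseLoop]
  | cons p ps ih =>
    intro present
    cases hp : PySem.Int.ofStr? (PySem.Str.strip p) with
    | none => simp [pvParseLoop, List.mapM_cons, hp]
    | some h =>
      rcases Bool.eq_false_or_eq_true (decide (h < 0) || decide (h > 23)) with hbad | hbad <;>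
        cases hm : ps.mapM (fun p => PySem.Int.ofStr? (PySem.Str.strip p)) <;>
          simp [pvParseLoop, List.mapM_cons, hp, hm, hbad, ih]

-- sorted(set(hours)) equals the 0..23 bucket filter when every hour is in range.
theorem sorted_set_eq_range_filter (hours : List Int)
    (hub : hours.any (fun h => decide (h < 0) || decide (h > 23)) = false) :
    PySem.List.sorted (PySem.Set.ofList hours) (fun x => x) false
      = (PySem.List.pyRange 0 24 1).filter (fun h => PySem.Set.contains (PySem.Set.ofList hours) h) := by
  apply PySem.List.sorted_id_eq_of_perm_of_pairwise
  · rw [List.perm_ext_iff_of_nodup (List.Nodup.filter _ (PySem.List.nodup_pyRange_one 0 24)) (PySem.Set.nodup_ofList hours)]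
    intro x
    simp only [List.mem_filter, PySem.List.mem_pyRange_one, PySem.Set.contains_iff]
    constructor
    · rintro ⟨_, hx⟩; exact hx
    · intro hx
      refine ⟨?_, hx⟩
      have := List.any_eq_false.mp hub x ((PySem.Set.mem_ofList hours x).mp hx)
      simp at this
      omega
  · exact List.Pairwise.filter _ ((PySem.List.pairwise_lt_pyRange_one 0 24).imp le_of_lt)

-- ===== VERDICT (by name: the statement is the Claim_ definition above) =====
theorem parse_schedule_input_spec : Claim_equal_parse_schedule_input := by
  intro raw _
  unfold Spec_parse_schedule_input parse_schedule_input parse_schedule_input_alt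
  by_cases hs : PySem.Str.strip raw = ""
  · rw [if_pos hs, if_pos hs]
  · rw [if_neg hs, if_neg hs]
    rw [pvParseLoop_eq]
    have hparts := split?_getD_ne_nil raw
    cases hm : ((PySem.Str.split? raw ",").getD []).mapM (fun h => PySem.Int.ofStr? (PySem.Str.strip h)) with
    | none => rfl
    | some hours =>
      have hne : hours ≠ [] := mapM_some_ne_nil _ _ _ hparts hm
      dsimp only
      by_cases hany : hours.any (fun h => decide (h < 0) || decide (h > 23)) = true
      · rw [if_pos (Or.inr hany), if_pos hany]
      · rw [if_neg (by
            rintro (h | h)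
            · exact hne h
            · exact hany h), if_neg hany]
        have hub : hours.any (fun h => decide (h < 0) || decide (h > 23)) = false :=
          Bool.eq_false_iff.mpr hany
        have hran : ∀ h ∈ hours, 0 ≤ h ∧ h ≤ 23 := by
          intro h hh
          have := List.any_eq_false.mp hub h hh
          simp at this
          omega
        rw [sorted_set_eq_range_filter hours hub]
        congr 1
        apply List.filter_congr
        intro x hx
        have hx' := (PySem.List.mem_pyRange_one).mp hx
        rw [foldl_set_getD hours (List.replicate 24 false) (by simp) hran x hx'.1 hx'.2]
        have hrep : (List.replicate 24 false).getD x.toNat false = false := by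
          rw [List.getD_eq_getElem?_getD, List.getElem?_replicate]
          split <;> rfl
        rw [hrep]
        simp [PySem.Set.mem_ofList]
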